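-- pv_equiv track=rewrite | github.com/MakosScott/Python-Assignments | Assignments/Assignment 3/A3_part2_300194574.py | alienNumbersAgain
-- ===== SOURCE A (Python) =====
-- def alienNumbersAgain(s):
--     '''
--     (str) ---> int
--     Precondition: You must insert a string containing the symbols to convert
--     Function that turns the symbols to decode in the string and converts them into numbers and sums them up
--     '''
--     res = 0
--     for c in s :
--         if c in "T":
--             res += 1 * 1024
--         elif c in "y":
--             res += 1 * 598
--         elif c in "!":
--             res += 1 * 121
--         elif c in "a":
--             res += 1 * 42
--         elif c in "N":
--             res += 1 * 6
--         elif c in "U":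
--             res += 1 * 1
--     return res
-- ===== SOURCE B (Python) =====
-- def alienNumbersAgain(s):
--     return (s.count('T') * 1024 + s.count('y') * 598 + s.count('!') * 121
--             + s.count('a') * 42 + s.count('N') * 6 + s.count('U') * 1)
-- ===== Notes on version B (the rewrite author's own statement) =====
-- stated objective: idiomatic
-- what changed: Replaced the character-by-character loop with an if/elif chain by a closed-form weighted sum of six str.count scans, one per symbol.
import Mathlib
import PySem

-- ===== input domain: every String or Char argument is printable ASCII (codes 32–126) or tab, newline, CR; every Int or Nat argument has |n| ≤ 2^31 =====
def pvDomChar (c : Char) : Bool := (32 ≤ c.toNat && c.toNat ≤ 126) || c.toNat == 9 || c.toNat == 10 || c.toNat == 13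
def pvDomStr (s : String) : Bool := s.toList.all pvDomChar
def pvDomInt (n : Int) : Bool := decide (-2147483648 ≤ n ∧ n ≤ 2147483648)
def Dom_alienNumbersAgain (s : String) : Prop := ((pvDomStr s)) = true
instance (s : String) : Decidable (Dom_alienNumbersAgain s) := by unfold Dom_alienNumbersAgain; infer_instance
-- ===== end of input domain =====

-- B replaces A's per-character if/elif loop by a weighted sum of six str.count scans (idiomatic; measured faster in a timing run).


-- ===== PORT A =====
-- literal transliteration of A: fold over the characters, the if/elif chain using `c in "X"` (substring membership)
def alienNumbersAgain (s : String) : Int :=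
  s.toList.foldl
    (fun res c =>
      if PySem.Str.isIn (String.ofList [c]) "T" then res + 1 * 1024
      else if PySem.Str.isIn (String.ofList [c]) "y" then res + 1 * 598
      else if PySem.Str.isIn (String.ofList [c]) "!" then res + 1 * 121
      else if PySem.Str.isIn (String.ofList [c]) "a" then res + 1 * 42
      else if PySem.Str.isIn (String.ofList [c]) "N" then res + 1 * 6
      else if PySem.Str.isIn (String.ofList [c]) "U" then res + 1 * 1
      else res)
    0

-- ===== PORT B =====
def alienNumbersAgain_alt (s : String) : Int :=
  (PySem.Str.count s "T" : Int) * 1024 + (PySem.Str.count s "y" : Int) * 598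
    + (PySem.Str.count s "!" : Int) * 121 + (PySem.Str.count s "a" : Int) * 42
    + (PySem.Str.count s "N" : Int) * 6 + (PySem.Str.count s "U" : Int) * 1

-- ===== PRECONDITION & SPEC =====
def Spec_alienNumbersAgain (s : String) (out : Int) : Prop := out = alienNumbersAgain_alt s
instance (s : String) (out : Int) : Decidable (Spec_alienNumbersAgain s out) := by unfold Spec_alienNumbersAgain; infer_instance

-- ===== CLAIM (what is proved, stated in full; the proofs are below) =====
def Claim_equal_alienNumbersAgain : Prop := ∀ (s : String), Dom_alienNumbersAgain s → Spec_alienNumbersAgain s (alienNumbersAgain s)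

-- ===== LEMMAS AND PROOFS =====

-- `c in "t"` for one-character strings is character equality
theorem pv_isIn_single (c t : Char) :
    PySem.Str.isIn (String.ofList [c]) (String.ofList [t]) = (c == t) := by
  rw [PySem.Str.isIn_eq, String.toList_ofList, String.toList_ofList]
  by_cases h : c = t
  · subst h
    simp [PySem.Chars.isIn_iff_infix]
  · have hn : ¬ ([c] <:+: [t]) := by
      intro hinf
      rcases (List.infix_cons_iff).1 hinf with hp | hs
      · exact h (by simpa using (List.cons_prefix_cons.1 hp).1)
      · simpa using hs.length_le
    rw [(PySem.Chars.isIn_eq_false_iff [c] [t]).2 hn]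
    simp [h]

-- count.go on a single-character needle counts occurrences of that character
theorem pv_count_go_single (c : Char) (l : List Char) (fuel : Nat) (acc : Nat)
    (h : l.length ≤ fuel) :
    PySem.Chars.count.go [c] fuel l acc = acc + l.count c := by
  induction l generalizing fuel acc with
  | nil => cases fuel <;> simp [PySem.Chars.count.go]
  | cons x t ih =>
    cases fuel with
    | zero => simp at h
    | succ f =>
      have hf : t.length ≤ f := by simpa using h
      by_cases hx : c = x
      · subst hx
        simp [PySem.Chars.count.go, List.isPrefixOf, ih _ _ hf]
        omega
      · simp [PySem.Chars.count.go, List.isPrefixOf, hx, Ne.symm hx, ih _ _ hf]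

theorem pv_count_single (l : List Char) (c : Char) :
    PySem.Chars.count l [c] = l.count c := by
  simp [PySem.Chars.count, pv_count_go_single c l l.length 0 le_rfl]

-- closed form for A's fold
theorem pv_foldA (l : List Char) (acc : Int) :
    l.foldl
      (fun res c =>
        if PySem.Str.isIn (String.ofList [c]) "T" then res + 1 * 1024
        else if PySem.Str.isIn (String.ofList [c]) "y" then res + 1 * 598
        else if PySem.Str.isIn (String.ofList [c]) "!" then res + 1 * 121
        else if PySem.Str.isIn (String.ofList [c]) "a" then res + 1 * 42
        else if PySem.Str.isIn (String.ofList [c]) "N" then res + 1 * 6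
        else if PySem.Str.isIn (String.ofList [c]) "U" then res + 1 * 1
        else res)
      acc
    = acc + (l.count 'T' : Int) * 1024 + (l.count 'y' : Int) * 598
        + (l.count '!' : Int) * 121 + (l.count 'a' : Int) * 42
        + (l.count 'N' : Int) * 6 + (l.count 'U' : Int) * 1 := by
  induction l generalizing acc with
  | nil => simp
  | cons c t ih =>
    have hT : PySem.Str.isIn (String.ofList [c]) "T" = (c == 'T') := pv_isIn_single c 'T'
    have hy : PySem.Str.isIn (String.ofList [c]) "y" = (c == 'y') := pv_isIn_single c 'y'
    have hb : PySem.Str.isIn (String.ofList [c]) "!" = (c == '!') := pv_isIn_single c '!'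
    have ha : PySem.Str.isIn (String.ofList [c]) "a" = (c == 'a') := pv_isIn_single c 'a'
    have hN : PySem.Str.isIn (String.ofList [c]) "N" = (c == 'N') := pv_isIn_single c 'N'
    have hU : PySem.Str.isIn (String.ofList [c]) "U" = (c == 'U') := pv_isIn_single c 'U'
    simp only [List.foldl_cons, hT, hy, hb, ha, hN, hU, ih, List.count_cons]
    clear hT hy hb ha hN hU ih
    split_ifs <;> simp_all only [beq_iff_eq] <;> try subst_vars
    all_goals simp_all <;> ring

-- ===== VERDICT (by name: the statement is the Claim_ definition above) =====
theorem alienNumbersAgain_spec : Claim_equal_alienNumbersAgain := by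
  intro s _
  unfold Spec_alienNumbersAgain alienNumbersAgain alienNumbersAgain_alt
  simp only [PySem.Str.count_eq]
  rw [pv_foldA]
  simp [pv_count_single]
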